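-- pv_equiv track=rewrite | github.com/sakabar/shogi_stats_analyzer | src/count_mate.py | get_discover_dic
-- ===== SOURCE A (Python) =====
-- from collections import defaultdict
--
-- def checkmate_score_to_hand_num(is_sente, score):
--     checkmate_score = 30000
--     ans = 0
--     if is_sente:
--         ans = checkmate_score - score + 1
--     else:
--         ans = checkmate_score + score + 1
--     return ans
--
-- def get_discover_dic(is_winner, is_sente, move_list):
--     checkmate_score = 30000
--     discover_dic = defaultdict(int)
--     final_score = move_list[-1][0] #終局時の評価値
--     cnt = 0
--
--     if (not is_winner):
--         #勝者でない場合は、必ず詰みに失敗している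
--         return discover_dic
--
--     if is_in_checkmate_procedure(is_sente, final_score):
--         cnt = checkmate_score_to_hand_num(is_sente, final_score) - 1
--     else:
--         cnt = 0
--
--     for ind, (v1, v_lst) in list(enumerate(move_list))[::-1]:
--         if is_in_checkmate_procedure(is_sente, v1):
--             cnt += 1
--         else:
--             break
--
--     if cnt == 0:
--         #評価値が詰み状態にならずに勝利 → 時間か勝勢による投了
--         return discover_dic
--
--     #1,3,5,...,cnt手詰に成功
--     for i in range(1, cnt+1, 2):
--         discover_dic[i] = 1
--
--     return discover_dic
--
-- def is_in_checkmate_procedure(is_sente, score):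
--     checkmate_score = 30000
--     if is_sente:
--         return score >= (checkmate_score - 100)
--     else:
--         return score <= -(checkmate_score - 100)
-- ===== SOURCE B (Python) =====
-- from collections import defaultdict
--
-- def _trailing_mate_count(is_sente, move_list):
--     # base from the final score (hand number minus one) plus the forward
--     # run-length of the trailing run of checkmate-procedure scores
--     if is_sente:
--         mate = lambda v: v >= 29900
--         base = 30000 - move_list[-1][0]
--     else:
--         mate = lambda v: v <= -29900
--         base = 30000 + move_list[-1][0]
--     if not mate(move_list[-1][0]):
--         base = 0
--     streak = 0
--     for v1, _ in move_list:
--         streak = streak + 1 if mate(v1) else 0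
--     return base + streak
--
-- def get_discover_dic(is_winner, is_sente, move_list):
--     if not is_winner or not move_list:
--         return defaultdict(int)
--     cnt = _trailing_mate_count(is_sente, move_list)
--     return defaultdict(int, {2 * k + 1: 1 for k in range((cnt + 1) // 2)})
-- ===== Notes on version B (the rewrite author's own statement) =====
-- stated objective: alternative
-- what changed: Replaces A's reverse enumerate-with-break loop and key-by-key defaultdict filling over range(1,cnt+1,2) by a forward run-length pass computing the trailing checkmate streak and a single dict built from a comprehension over the (cnt+1)//2 odd keys, with the base merged into per-side arithmetic (30000 -/+ final_score).
import Mathlib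
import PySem

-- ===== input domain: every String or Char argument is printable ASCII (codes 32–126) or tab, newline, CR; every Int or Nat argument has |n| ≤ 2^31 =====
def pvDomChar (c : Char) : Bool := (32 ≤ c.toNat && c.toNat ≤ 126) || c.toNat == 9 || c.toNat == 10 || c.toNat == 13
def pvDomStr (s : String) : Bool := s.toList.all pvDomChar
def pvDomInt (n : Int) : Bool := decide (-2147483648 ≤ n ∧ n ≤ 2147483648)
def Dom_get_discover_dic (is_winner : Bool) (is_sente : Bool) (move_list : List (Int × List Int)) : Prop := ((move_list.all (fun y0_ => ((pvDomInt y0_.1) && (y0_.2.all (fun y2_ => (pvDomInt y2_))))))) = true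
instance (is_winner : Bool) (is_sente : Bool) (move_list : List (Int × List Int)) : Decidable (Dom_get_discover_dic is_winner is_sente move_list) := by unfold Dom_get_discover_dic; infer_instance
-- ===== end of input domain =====

-- B replaces A's reverse enumerate-with-break loop and key-by-key dict filling by a forward streak pass and a dict built from one comprehension over the odd keys (same O(n) cost; different decomposition).


-- ===== PORT A =====
-- checkmate_score_to_hand_num (module helper used by A)
def pvChkHand (is_sente : Bool) (score : Int) : Int :=
  if is_sente then 30000 - score + 1 else 30000 + score + 1

-- is_in_checkmate_procedure (module helper used by A)
def pvInChk (is_sente : Bool) (score : Int) : Bool :=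
  if is_sente then decide (score ≥ 30000 - 100) else decide (score ≤ -(30000 - 100))

-- A's backwards loop over list(enumerate(move_list))[::-1] with break
def pvALoop (is_sente : Bool) : List (Int × (Int × List Int)) → Int → Int
  | [], cnt => cnt
  | (_, (v1, _)) :: rest, cnt =>
    if pvInChk is_sente v1 then pvALoop is_sente rest (cnt + 1) else cnt

def get_discover_dic (is_winner : Bool) (is_sente : Bool) (move_list : List (Int × List Int)) : List (Int × Int) :=
  match PySem.List.pyGet? move_list (-1) with
  | none => []   -- IndexError (empty move_list): outside Pre_
  | some last =>
    let final_score := last.1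
    if !is_winner then []
    else
      let cnt0 : Int := if pvInChk is_sente final_score then pvChkHand is_sente final_score - 1 else 0
      let cnt := pvALoop is_sente ((PySem.List.enumerate move_list).reverse) cnt0
      if cnt = 0 then []
      else ((PySem.List.pyRange 1 (cnt + 1) 2).foldl
              (fun d i => d.insert i 1) (PySem.Dict.empty : PySem.Dict Int Int)).items

-- ===== PORT B =====
-- _trailing_mate_count: per-side (mate predicate, base) pair, then one forward run-length pass
-- (move_list[-1] ported with a default: B only calls this under its nonempty guard, where Python's [-1] returns)
def pvTrailMateCnt (is_sente : Bool) (move_list : List (Int × List Int)) : Int :=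
  let fin := (PySem.List.pyGetD move_list (-1) (0, [])).1
  let mb : (Int → Bool) × Int :=
    if is_sente then ((fun v => decide ((29900:Int) ≤ v)), 30000 - fin)
    else ((fun v => decide (v ≤ (-29900:Int))), 30000 + fin)
  let base : Int := if mb.1 fin then mb.2 else 0
  base + move_list.foldl (fun streak p => if mb.1 p.1 then streak + 1 else 0) 0

def get_discover_dic_alt (is_winner : Bool) (is_sente : Bool) (move_list : List (Int × List Int)) : List (Int × Int) :=
  if !is_winner || move_list.isEmpty then []
  else
    let cnt := pvTrailMateCnt is_sente move_list
    (PySem.Dict.ofList ((PySem.List.pyRange 0 (PySem.Int.floordiv (cnt + 1) 2) 1).map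
        (fun k => (2 * k + 1, (1:Int))))).items

-- ===== PRECONDITION & SPEC =====
-- Pre_ excludes only the empty move_list, on which A's `move_list[-1]` raises IndexError.
def Pre_get_discover_dic (is_winner : Bool) (is_sente : Bool) (move_list : List (Int × List Int)) : Prop :=
  move_list ≠ []
instance (is_winner : Bool) (is_sente : Bool) (move_list : List (Int × List Int)) : Decidable (Pre_get_discover_dic is_winner is_sente move_list) := by unfold Pre_get_discover_dic; infer_instance

def pvWitness_get_discover_dic : Bool × Bool × (List (Int × List Int)) := (true, true, [(29950, [])])

def Spec_get_discover_dic (is_winner : Bool) (is_sente : Bool) (move_list : List (Int × List Int)) (out : List (Int × Int)) : Prop := out = get_discover_dic_alt is_winner is_sente move_list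
instance (is_winner : Bool) (is_sente : Bool) (move_list : List (Int × List Int)) (out : List (Int × Int)) : Decidable (Spec_get_discover_dic is_winner is_sente move_list out) := by unfold Spec_get_discover_dic; infer_instance

-- ===== CLAIM (what is proved, stated in full; the proofs are below) =====
def Claim_equal_get_discover_dic : Prop := ∀ (is_winner : Bool) (is_sente : Bool) (move_list : List (Int × List Int)), Dom_get_discover_dic is_winner is_sente move_list → Pre_get_discover_dic is_winner is_sente move_list → Spec_get_discover_dic is_winner is_sente move_list (get_discover_dic is_winner is_sente move_list)

-- ===== LEMMAS AND PROOFS =====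
-- A's backwards break-loop equals init plus the forward trailing streak of q-moves
lemma pvALoop_eq_streak (s : Bool) (q : Int → Bool) (hq : ∀ v, pvInChk s v = q v)
    (ml : List (Int × List Int)) (c : Int) :
    pvALoop s ((PySem.List.enumerate ml).reverse) c
      = c + ml.foldl (fun streak p => if q p.1 then streak + 1 else 0) 0 := by
  induction ml using List.reverseRecOn generalizing c with
  | nil => simp [pvALoop]
  | append_singleton l x ih =>
    obtain ⟨v1, vl⟩ := x
    rw [PySem.List.enumerate_append]
    simp only [List.reverse_append, List.foldl_append,
      PySem.List.enumerate_cons, PySem.List.enumerate_nil,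
      List.reverse_cons, List.reverse_nil, List.nil_append, List.cons_append,
      List.foldl_cons, List.foldl_nil, pvALoop, hq]
    by_cases h : q v1
    · simp [h, ih]; ring
    · simp [h]

-- A's odd-key insert loop and B's dict built from the odd-key comprehension have the same items
lemma pvDicts_eq (cnt : Int) :
    ((PySem.List.pyRange 1 (cnt + 1) 2).foldl
        (fun d i => d.insert i 1) (PySem.Dict.empty : PySem.Dict Int Int)).items
      = (PySem.Dict.ofList ((PySem.List.pyRange 0 (PySem.Int.floordiv (cnt + 1) 2) 1).map
          (fun k => (2 * k + 1, (1:Int))))).items := by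
  have hnd1 : ((PySem.List.pyRange 1 (cnt + 1) 2).map (fun i => i)).Nodup := by
    rw [PySem.List.pyRange_of_pos _ _ (by norm_num : (0:ℤ) < 2)]
    simp only [List.map_id']
    exact (List.nodup_range).map (fun a b h => by omega)
  have hnd2 : (((PySem.List.pyRange 0 (PySem.Int.floordiv (cnt + 1) 2) 1).map
      (fun k => (2 * k + 1, (1:Int)))).map (fun p => p.1)).Nodup := by
    rw [PySem.List.pyRange_of_pos _ _ (by norm_num : (0:ℤ) < 1)]
    simp only [List.map_map]
    exact (List.nodup_range).map (fun a b h => by simp [Function.comp] at h; omega)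
  have h1 := PySem.Dict.items_foldl_insert_fresh (PySem.List.pyRange 1 (cnt + 1) 2)
    (fun i => i) (fun _ => (1:Int)) (PySem.Dict.empty : PySem.Dict Int Int)
    (fun a _ => PySem.Dict.contains_empty a) hnd1
  have h2 := PySem.Dict.items_foldl_insert_fresh
    ((PySem.List.pyRange 0 (PySem.Int.floordiv (cnt + 1) 2) 1).map (fun k => (2 * k + 1, (1:Int))))
    (fun p => p.1) (fun p => p.2) (PySem.Dict.empty : PySem.Dict Int Int)
    (fun a _ => PySem.Dict.contains_empty a.1) hnd2
  beta_reduce at h1 h2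
  simp only [PySem.Dict.ofList, PySem.Dict.update]
  rw [h1, h2]
  simp only [List.map_map]
  rw [PySem.List.pyRange_of_pos _ _ (by norm_num : (0:ℤ) < 2),
      PySem.List.pyRange_of_pos _ _ (by norm_num : (0:ℤ) < 1),
      PySem.Int.floordiv_eq_ediv_of_pos (by norm_num : (0:ℤ) < 2)]
  simp only [List.map_map]
  have hn : (if (1:ℤ) < cnt + 1 then ((cnt + 1 - 1 + 2 - 1) / 2).toNat else 0)
      = (if (0:ℤ) < (cnt + 1) / 2 then (((cnt + 1) / 2 - 0 + 1 - 1) / 1).toNat else 0) := by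
    split_ifs <;> omega
  rw [hn]
  refine List.map_congr_left (fun k _ => ?_)
  simp only [Function.comp_apply, Prod.mk.injEq]
  exact ⟨by ring, trivial⟩

-- ===== VERDICT (by name: the statement is the Claim_ definition above) =====
theorem get_discover_dic_spec : Claim_equal_get_discover_dic := by
  intro is_winner is_sente move_list _hdom hpre
  have hne : move_list ≠ [] := hpre
  unfold Spec_get_discover_dic get_discover_dic get_discover_dic_alt pvTrailMateCnt
  rw [PySem.List.pyGet?_neg_one, List.getLast?_eq_some_getLast hne,
      PySem.List.pyGetD_neg_one _ _ hne]
  cases is_winner with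
  | false => simp
  | true =>
    simp only [Bool.not_true, Bool.false_eq_true, if_false, Bool.false_or,
      List.isEmpty_iff]
    rw [if_neg hne]
    set fin := (move_list.getLast hne).1
    cases is_sente with
    | true =>
      rw [pvALoop_eq_streak true (fun v => decide ((29900:Int) ≤ v)) (fun v => by simp [pvInChk])]
      have hc : (if pvInChk true fin = true then pvChkHand true fin - 1 else 0)
          = (if decide ((29900:Int) ≤ fin) = true then 30000 - fin else 0) := by
        simp [pvInChk, pvChkHand]
      rw [hc]
      simp only [if_true]
      generalize (if decide ((29900:Int) ≤ fin) = true then 30000 - fin else 0)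
          + List.foldl (fun streak p => if decide ((29900:Int) ≤ p.1) = true then streak + 1 else 0) 0 move_list = c
      split
      · rename_i h; rw [h]; decide
      · exact pvDicts_eq c

    | false =>
      rw [pvALoop_eq_streak false (fun v => decide (v ≤ (-29900:Int))) (fun v => by simp [pvInChk])]
      have hc : (if pvInChk false fin = true then pvChkHand false fin - 1 else 0)
          = (if decide (fin ≤ (-29900:Int)) = true then 30000 + fin else 0) := by
        simp [pvInChk, pvChkHand]
      rw [hc]
      simp only [Bool.false_eq_true, if_false]
      generalize (if decide (fin ≤ (-29900:Int)) = true then 30000 + fin else 0)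
          + List.foldl (fun streak p => if decide (p.1 ≤ (-29900:Int)) = true then streak + 1 else 0) 0 move_list = c
      split
      · rename_i h; rw [h]; decide
      · exact pvDicts_eq c
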